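-- pv_equiv track=rewrite | github.com/ChanMeng666/juejin-algorithm-practice | juejin71-80/juejin72.py | solution
-- ===== SOURCE A (Python) =====
-- def solution(num, data):
--     # 将字符串转换为列表以便修改
--     dominoes = list(data)
--     n = len(dominoes)
--
--     # 记录每个位置的受力情况
--     forces = [0] * n
--
--     # 从左向右处理R的影响
--     force = 0
--     for i in range(n):
--         if dominoes[i] == 'R':
--             force = n
--         elif dominoes[i] == 'L':
--             force = 0
--         else:
--             force = max(force - 1, 0)
--         forces[i] += force
--
--     # 从右向左处理L的影响
--     force = 0
--     for i in range(n-1, -1, -1):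
--         if dominoes[i] == 'L':
--             force = n
--         elif dominoes[i] == 'R':
--             force = 0
--         else:
--             force = max(force - 1, 0)
--         forces[i] -= force
--
--     # 找出保持竖直的骨牌位置
--     standing = []
--     for i in range(n):
--         if forces[i] == 0 and dominoes[i] == '.':
--             standing.append(i + 1)  # 转换为1-based索引
--
--     # 格式化输出
--     if not standing:
--         return '0'
--     return f'{len(standing)}:{",".join(map(str, standing))}'
-- ===== SOURCE B (Python) =====
-- def solution(num, data):
--     # One pass over the string: keep the direction/index of the previous anchor
--     # ('L' at -1 as a virtual left wall) and the 1-based positions of the dots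
--     # seen since it; settle each gap when the next anchor (or the end) arrives.
--     standing = []
--     seg = []                      # 1-based '.' positions since the last anchor
--     prev_dir, prev_i = 'L', -1
--     for j, c in enumerate(data):
--         if c == 'L' or c == 'R':
--             if prev_dir == 'L' and c == 'R':
--                 standing += seg               # L ... R : whole gap stands
--             elif prev_dir == 'R' and c == 'L' and (prev_i + j) % 2 == 0:
--                 mid = (prev_i + j) // 2 + 1   # R ... L : only the exact middle
--                 if mid in seg:
--                     standing.append(mid)
--             prev_dir, prev_i, seg = c, j, []
--         elif c == '.':
--             seg.append(j + 1)
--     if prev_dir == 'L':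
--         standing += seg                       # open right end after an 'L'
--     if not standing:
--         return '0'
--     return f'{len(standing)}:{",".join(map(str, standing))}'
-- ===== Notes on version B (the rewrite author's own statement) =====
-- stated objective: faster
-- what changed: Replaces the two force-accumulation passes plus a collection pass over integer force arrays by a single anchor-to-anchor segment scan that settles each gap (L..R all stand, R..L only the odd-gap middle, otherwise none) as the next pushed domino is met.
import Mathlib
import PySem

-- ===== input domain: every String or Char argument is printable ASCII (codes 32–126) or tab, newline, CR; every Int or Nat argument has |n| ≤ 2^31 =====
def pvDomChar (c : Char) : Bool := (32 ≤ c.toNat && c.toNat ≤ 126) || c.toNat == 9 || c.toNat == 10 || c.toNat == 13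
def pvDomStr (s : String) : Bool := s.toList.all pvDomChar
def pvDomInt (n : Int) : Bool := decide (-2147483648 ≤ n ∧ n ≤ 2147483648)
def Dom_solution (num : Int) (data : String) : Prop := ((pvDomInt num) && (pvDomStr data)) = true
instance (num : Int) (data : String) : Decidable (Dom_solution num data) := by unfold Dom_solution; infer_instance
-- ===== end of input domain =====

-- B replaces A's two force-accumulation passes over integer arrays by a single
-- anchor-to-anchor segment scan; return values are proved identical on all inputs.

-- ===== PORT A =====
-- first loop: left-to-right force propagation (force carried as loop state)
def fwdGo (n : Int) (f : Int) : List Char → List Int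
  | [] => []
  | c :: cs =>
    let f' := if c = 'R' then n else if c = 'L' then 0 else max (f - 1) 0
    f' :: fwdGo n f' cs

-- second loop (i from n-1 down to 0): structural right-to-left scan; returns the
-- per-position backward forces together with the final loop-state force
def bwdGo (n : Int) : List Char → List Int × Int
  | [] => ([], 0)
  | c :: cs =>
    let r := bwdGo n cs
    let f' := if c = 'L' then n else if c = 'R' then 0 else max (r.2 - 1) 0
    (f' :: r.1, f')

-- third loop: collect 1-based indices where the net force is 0 on a '.'
def collectA (i : Int) : List Char → List Int → List Int
  | c :: cs, x :: xs => (if x = 0 ∧ c = '.' then [i + 1] else []) ++ collectA (i + 1) cs xs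
  | _, _ => []

def fmtA (standing : List Int) : String :=
  if standing = [] then "0"
  else PySem.Int.toStr (standing.length : Int) ++ ":" ++
       PySem.Str.join "," (standing.map PySem.Int.toStr)

def solution (num : Int) (data : String) : String :=
  let dominoes := data.toList
  let n : Int := (dominoes.length : Int)
  let forces1 := fwdGo n 0 dominoes
  let forces2 := (bwdGo n dominoes).1
  fmtA (collectA 0 dominoes (List.zipWith (· - ·) forces1 forces2))

-- ===== PORT B =====
-- one pass: previous anchor direction/index ('L' at -1 virtually), 1-based '.'
-- positions since it in `seg`; settle the gap when the next anchor (or end) arrives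
def altGo (j : Int) (prevDir : Char) (prevI : Int) (seg standing : List Int) :
    List Char → List Int
  | [] => if prevDir = 'L' then standing ++ seg else standing
  | c :: rest =>
    if c = 'L' ∨ c = 'R' then
      let standing' :=
        if prevDir = 'L' ∧ c = 'R' then standing ++ seg
        else if prevDir = 'R' ∧ c = 'L' ∧ PySem.Int.mod (prevI + j) 2 = 0 then
          let mid := PySem.Int.floordiv (prevI + j) 2 + 1
          if mid ∈ seg then standing ++ [mid] else standing
        else standing
      altGo (j + 1) c j [] standing' rest
    else if c = '.' then altGo (j + 1) prevDir prevI (seg ++ [j + 1]) standing rest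
    else altGo (j + 1) prevDir prevI seg standing rest

def fmtB (standing : List Int) : String :=
  if standing = [] then "0"
  else PySem.Int.toStr (standing.length : Int) ++ ":" ++
       PySem.Str.join "," (standing.map PySem.Int.toStr)

def solution_alt (num : Int) (data : String) : String :=
  fmtB (altGo 0 'L' (-1) [] [] data.toList)

-- ===== PRECONDITION & SPEC =====
def Spec_solution (num : Int) (data : String) (out : String) : Prop := out = solution_alt num data
instance (num : Int) (data : String) (out : String) : Decidable (Spec_solution num data out) := by unfold Spec_solution; infer_instance

-- ===== CLAIM (what is proved, stated in full; the proofs are below) =====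
def Claim_equal_solution : Prop := ∀ (num : Int) (data : String), Dom_solution num data → Spec_solution num data (solution num data)

-- ===== LEMMAS AND PROOFS =====

-- a list of chars containing no pushed domino
def Free (cs : List Char) : Prop := ∀ c ∈ cs, c ≠ 'L' ∧ c ≠ 'R'

-- 1-based positions of the dots of cs, cs starting at absolute index i
def dotsFrom (i : Int) : List Char → List Int
  | [] => []
  | c :: cs => (if c = '.' then [i + 1] else []) ++ dotsFrom (i + 1) cs

-- bwdGo generalized over the force entering from the right
def bwdAux (n f : Int) : List Char → List Int × Int
  | [] => ([], f)
  | c :: cs =>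
    let r := bwdAux n f cs
    let f' := if c = 'L' then n else if c = 'R' then 0 else max (r.2 - 1) 0
    (f' :: r.1, f')

theorem bwdGo_eq_aux (n : Int) (cs : List Char) : bwdGo n cs = bwdAux n 0 cs := by
  induction cs with
  | nil => rfl
  | cons c cs ih => simp [bwdGo, bwdAux, ih]

theorem bwdAux_append (n f : Int) (xs ys : List Char) :
    bwdAux n f (xs ++ ys) =
      ((bwdAux n (bwdAux n f ys).2 xs).1 ++ (bwdAux n f ys).1,
       (bwdAux n (bwdAux n f ys).2 xs).2) := by
  induction xs with
  | nil => simp [bwdAux]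
  | cons c xs ih => simp [bwdAux, ih]

theorem fwd_free_zero (n : Int) (pre cs' : List Char) (h : Free pre) :
    fwdGo n 0 (pre ++ cs') = List.replicate pre.length 0 ++ fwdGo n 0 cs' := by
  induction pre with
  | nil => simp
  | cons c pre ih =>
    obtain ⟨h1, h2⟩ := h c (by simp)
    simp only [List.cons_append, fwdGo, h1, h2, if_false, List.length_cons,
      List.replicate_succ]
    have : max (0 - 1 : Int) 0 = 0 := by omega
    simp [this, ih (fun c hc => h c (by simp [hc]))]

theorem fwd_free_pos (n : Int) (pre cs' : List Char) (h : Free pre) :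
    ∀ f : Int, (pre.length : Int) ≤ f →
    fwdGo n f (pre ++ cs') =
      ((List.range pre.length).map (fun k : Nat => f - 1 - (k : Int))) ++
        fwdGo n (f - pre.length) cs' := by
  induction pre with
  | nil => intro f hf; simp
  | cons c pre ih =>
    intro f hf
    obtain ⟨h1, h2⟩ := h c (by simp)
    simp only [List.length_cons] at hf
    have hlen : ((pre.length : Int)) ≤ f - 1 := by push_cast at hf ⊢; omega
    have hmax : max (f - 1) 0 = f - 1 := by push_cast at hf; omega
    simp only [List.cons_append, fwdGo, h1, h2, if_false, hmax]
    rw [ih (fun c hc => h c (by simp [hc])) (f - 1) hlen]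
    simp only [List.length_cons]
    rw [List.range_succ_eq_map]
    simp only [List.map_cons, List.map_map, List.cons_append]
    have efun : ((fun k : Nat => f - 1 - (k : Int)) ∘ Nat.succ)
        = (fun k : Nat => f - 1 - 1 - (k : Int)) := by
      funext k; simp only [Function.comp_apply]; push_cast; ring
    have ehead : f - 1 - ((0 : Nat) : Int) = f - 1 := by push_cast; ring
    have earg : f - ((pre.length + 1 : Nat) : Int) = f - 1 - (pre.length : Int) := by
      push_cast; ring
    rw [efun, ehead, earg]

theorem bwd_free_zero (n : Int) (pre : List Char) (h : Free pre) :
    bwdAux n 0 pre = (List.replicate pre.length 0, 0) := by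
  induction pre with
  | nil => rfl
  | cons c pre ih =>
    obtain ⟨h1, h2⟩ := h c (by simp)
    have := ih (fun c hc => h c (by simp [hc]))
    have hmax : max ((0 : Int) - 1) 0 = 0 := by omega
    simp [bwdAux, h1, h2, this, hmax, List.replicate_succ]

theorem bwd_free_pos (n : Int) (pre : List Char) (h : Free pre) :
    ∀ f : Int, (pre.length : Int) ≤ f →
    bwdAux n f pre =
      ((List.range pre.length).map (fun k : Nat => f - (pre.length : Int) + (k : Int)),
       f - pre.length) := by
  induction pre with
  | nil => intro f hf; simp [bwdAux]
  | cons c pre ih =>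
    intro f hf
    obtain ⟨h1, h2⟩ := h c (by simp)
    simp only [List.length_cons] at hf
    have hlen : ((pre.length : Int)) ≤ f := by push_cast at hf ⊢; omega
    have := ih (fun c hc => h c (by simp [hc])) f hlen
    have hmax : max (f - (pre.length : Int) - 1) 0 = f - (pre.length + 1 : Int) := by
      push_cast at hf ⊢; omega
    simp only [bwdAux, h1, h2, if_false, this, List.length_cons]
    rw [List.range_succ_eq_map]
    simp only [List.map_cons, List.map_map]
    have efun : ((fun k : Nat => f - ((pre.length + 1 : Nat) : Int) + (k : Int)) ∘ Nat.succ)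
        = (fun k : Nat => f - (pre.length : Int) + (k : Int)) := by
      funext k; simp only [Function.comp_apply]; push_cast; ring
    have ehead : f - ((pre.length + 1 : Nat) : Int) + ((0 : Nat) : Int)
        = max (f - (pre.length : Int) - 1) 0 := by push_cast at hf ⊢; omega
    have eexit : f - ((pre.length + 1 : Nat) : Int)
        = max (f - (pre.length : Int) - 1) 0 := by push_cast at hf ⊢; omega
    rw [efun, ehead, eexit]

theorem collectA_append (i : Int) (cs cs' : List Char) (as as' : List Int)
    (h : as.length = cs.length) :
    collectA i (cs ++ cs') (as ++ as') =
      collectA i cs as ++ collectA (i + cs.length) cs' as' := by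
  induction cs generalizing i as with
  | nil => simp at h; simp [h, collectA]
  | cons c cs ih =>
    match as with
    | [] => simp at h
    | a :: as =>
      simp at h
      simp only [List.cons_append, collectA, ih (i + 1) as h, List.length_cons]
      have : i + 1 + (cs.length : Int) = i + ((cs.length : Int) + 1) := by omega
      rw [this]
      simp [List.append_assoc]

theorem collect_dots (pre : List Char) : ∀ i : Int,
    collectA i pre (List.replicate pre.length 0) = dotsFrom i pre := by
  induction pre with
  | nil => intro i; rfl
  | cons c pre ih => intro i; simp [collectA, dotsFrom, List.replicate_succ, ih]

theorem collect_nonzero (pre : List Char) : ∀ (i : Int) (ds : List Int),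
    (∀ x ∈ ds, x ≠ 0) → collectA i pre ds = [] := by
  induction pre with
  | nil => intro i ds _; cases ds <;> rfl
  | cons c pre ih =>
    intro i ds h
    cases ds with
    | nil => rfl
    | cons d ds =>
      have hd : d ≠ 0 := h d (by simp)
      simp [collectA, hd, ih (i + 1) ds (fun x hx => h x (by simp [hx]))]

theorem zipWith_sub_repl_right (l : List Int) (m : Nat) (h : l.length = m) :
    List.zipWith (· - ·) l (List.replicate m 0) = l := by
  induction l generalizing m with
  | nil => rfl
  | cons x l ih =>
    cases m with
    | zero => simp at h
    | succ m => simp [List.replicate_succ, ih m (by simpa using h)]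

theorem zipWith_sub_repl_left (l : List Int) (m : Nat) (h : l.length = m) :
    List.zipWith (· - ·) (List.replicate m 0) l = l.map (fun x => 0 - x) := by
  induction l generalizing m with
  | nil => simp
  | cons x l ih =>
    cases m with
    | zero => simp at h
    | succ m => simp [List.replicate_succ, ih m (by simpa using h)]

theorem zipWith_sub_split (xs ys xr yr : List Int) (h : xs.length = ys.length) :
    List.zipWith (· - ·) (xs ++ xr) (ys ++ yr)
      = List.zipWith (· - ·) xs ys ++ List.zipWith (· - ·) xr yr := by
  induction xs generalizing ys with
  | nil => cases ys with
    | nil => simp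
    | cons y ys => simp at h
  | cons x xs ih =>
    cases ys with
    | nil => simp at h
    | cons y ys =>
      simp only [List.cons_append, List.zipWith_cons_cons]
      rw [ih ys (by simpa using h)]

theorem zipWith_map_same {α β γ δ : Type} (f : β → γ → δ) (g : α → β) (h : α → γ)
    (l : List α) :
    List.zipWith f (l.map g) (l.map h) = l.map (fun x => f (g x) (h x)) := by
  induction l with
  | nil => rfl
  | cons x l ih => simp [ih]

theorem collect_lin (pre : List Char) : ∀ (i t : Int),
    collectA i pre ((List.range pre.length).map (fun k : Nat => t - 2 * (k : Int))) =
      if t % 2 = 0 ∧ 0 ≤ t ∧ t < 2 * (pre.length : Int) ∧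
          pre.getD (t / 2).toNat 'L' = '.' then [i + t / 2 + 1] else [] := by
  induction pre with
  | nil =>
    intro i t
    simp only [List.length_nil, List.range_zero, List.map_nil]
    rw [if_neg (by rintro ⟨_, h1, h2, _⟩; push_cast at h2; omega)]
    rfl
  | cons c pre ih =>
    intro i t
    simp only [List.length_cons]
    rw [List.range_succ_eq_map]
    simp only [List.map_cons, List.map_map]
    have efun : ((fun k : Nat => t - 2 * (k : Int)) ∘ Nat.succ)
        = (fun k : Nat => (t - 2) - 2 * (k : Int)) := by
      funext k; simp only [Function.comp_apply]; push_cast; ring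
    have ehead : t - 2 * ((0 : Nat) : Int) = t := by push_cast; ring
    rw [efun, ehead]
    simp only [collectA]
    rw [ih (i + 1) (t - 2)]
    by_cases ht : t = 0
    · subst ht
      have hz : ((0 : Int) / 2).toNat = 0 := by norm_num
      have htail : ¬(((0 : Int) - 2) % 2 = 0 ∧ (0 : Int) ≤ 0 - 2 ∧
          (0 : Int) - 2 < 2 * (pre.length : Int) ∧
          pre.getD (((0 : Int) - 2) / 2).toNat 'L' = '.') := by
        rintro ⟨_, h, _⟩; omega
      rw [if_neg htail, List.append_nil]
      by_cases hc : c = '.'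
      · rw [if_pos (show (0 : Int) = 0 ∧ c = '.' from ⟨rfl, hc⟩),
          if_pos (show (0 : Int) % 2 = 0 ∧ (0 : Int) ≤ 0 ∧
              (0 : Int) < 2 * ((pre.length + 1 : Nat) : Int) ∧
              (c :: pre).getD ((0 : Int) / 2).toNat 'L' = '.' from
            ⟨by norm_num, le_refl _, by push_cast; omega,
             by rw [hz, List.getD_cons_zero]; exact hc⟩)]
        norm_num
      · have hn1 : ¬((0 : Int) = 0 ∧ c = '.') := fun h => hc h.2
        have hn2 : ¬((0 : Int) % 2 = 0 ∧ (0 : Int) ≤ 0 ∧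
            (0 : Int) < 2 * ((pre.length + 1 : Nat) : Int) ∧
            (c :: pre).getD ((0 : Int) / 2).toNat 'L' = '.') := by
          rintro ⟨-, -, -, hg⟩; rw [hz, List.getD_cons_zero] at hg; exact hc hg
        rw [if_neg hn1, if_neg hn2]
    · rw [if_neg (by rintro ⟨h, _⟩; exact ht h), List.nil_append]
      by_cases h2 : t % 2 = 0 ∧ 0 ≤ t ∧ t < 2 * ((pre.length : Int) + 1)
      · obtain ⟨hpar, hnn, hlt⟩ := h2
        have ht2 : 2 ≤ t := by omega
        have htn : (t / 2).toNat = ((t - 2) / 2).toNat + 1 := by omega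
        rw [htn, List.getD_cons_succ]
        by_cases hg : pre.getD ((t - 2) / 2).toNat 'L' = '.'
        · rw [if_pos ⟨by omega, by omega, by omega, hg⟩,
            if_pos ⟨hpar, hnn, by push_cast; omega, hg⟩]
          simp only [List.cons.injEq, and_true]
          omega
        · rw [if_neg (by rintro ⟨_, _, _, hgg⟩; exact hg hgg),
            if_neg (by rintro ⟨_, _, _, hgg⟩; exact hg hgg)]
      · rw [if_neg (by rintro ⟨a, b, cc, _⟩; exact h2 ⟨by omega, by omega, by omega⟩),
          if_neg (by rintro ⟨a, b, cc, _⟩; push_cast at cc; exact h2 ⟨a, b, by omega⟩)]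

theorem mem_dotsFrom_bounds (pre : List Char) : ∀ (i x : Int),
    x ∈ dotsFrom i pre → i < x ∧ x ≤ i + pre.length := by
  induction pre with
  | nil => intro i x hx; simp [dotsFrom] at hx
  | cons c pre ih =>
    intro i x hx
    simp only [dotsFrom, List.mem_append] at hx
    rcases hx with hx | hx
    · have : x = i + 1 := by by_cases hc : c = '.' <;> simp [hc] at hx <;> omega
      simp; omega
    · have := ih (i + 1) x hx
      simp at this ⊢; omega

theorem mem_dotsFrom (pre : List Char) : ∀ (i : Int) (k : Nat), k < pre.length →
    ((i + k + 1) ∈ dotsFrom i pre ↔ pre.getD k 'L' = '.') := by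
  induction pre with
  | nil => intro i k hk; simp at hk
  | cons c pre ih =>
    intro i k hk
    cases k with
    | zero =>
      simp only [dotsFrom, List.mem_append, List.getD, Nat.cast_zero]
      constructor
      · intro h
        rcases h with h | h
        · by_cases hc : c = '.' <;> simp [hc] at h ⊢
        · exfalso; have := mem_dotsFrom_bounds pre (i + 1) _ h; omega
      · intro h; left; simp [List.getD] at h; simp [h]
    | succ k =>
      simp only [List.length_cons] at hk
      have hk' : k < pre.length := by omega
      have ihk := ih (i + 1) k hk'
      have hval : i + ((k : Int) + 1) + 1 = (i + 1) + (k : Int) + 1 := by ring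
      simp only [dotsFrom, List.mem_append, Nat.cast_add, Nat.cast_one, hval,
        List.getD_cons_succ]
      rw [← ihk]
      constructor
      · rintro (h | h)
        · exfalso; by_cases hc : c = '.' <;> simp [hc] at h; omega
        · exact h
      · intro h; right; exact h

theorem altGo_free (pre : List Char) (h : Free pre) :
    ∀ (j prevI : Int) (d : Char) (seg standing : List Int) (cs' : List Char),
    altGo j d prevI seg standing (pre ++ cs') =
      altGo (j + pre.length) d prevI (seg ++ dotsFrom j pre) standing cs' := by
  induction pre with
  | nil => intro j prevI d seg standing cs'; simp [dotsFrom]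
  | cons c pre ih =>
    intro j prevI d seg standing cs'
    obtain ⟨h1, h2⟩ := h c (by simp)
    have hfree : Free pre := fun c hc => h c (by simp [hc])
    have hna : ¬(c = 'L' ∨ c = 'R') := by simp [h1, h2]
    have hidx : j + ((pre.length : Int) + 1) = j + 1 + pre.length := by omega
    by_cases hc : c = '.'
    · simp only [List.cons_append, altGo, hna, if_false, hc, if_true, dotsFrom,
        List.length_cons, Nat.cast_add, Nat.cast_one]
      rw [ih hfree (j+1) prevI d (seg ++ [j+1]) standing cs', hidx]
      simp [List.append_assoc]
    · simp only [List.cons_append, altGo, hna, if_false, hc, dotsFrom,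
        List.length_cons, Nat.cast_add, Nat.cast_one]
      rw [ih hfree (j+1) prevI d seg standing cs', hidx]
      simp

theorem free_or_split (cs : List Char) :
    Free cs ∨ ∃ pre b rest, cs = pre ++ b :: rest ∧ Free pre ∧ (b = 'L' ∨ b = 'R') := by
  induction cs with
  | nil => left; intro c hc; simp at hc
  | cons c cs ih =>
    by_cases hc : c = 'L' ∨ c = 'R'
    · right; exact ⟨[], c, cs, by simp, fun c hc => by simp at hc, hc⟩
    · push_neg at hc
      rcases ih with hfree | ⟨pre, b, rest, heq, hpre, hb⟩
      · left; intro d hd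
        rcases List.mem_cons.mp hd with h | h
        · subst h; exact hc
        · exact hfree d h
      · right
        exact ⟨c :: pre, b, rest, by simp [heq], fun d hd => by
          rcases List.mem_cons.mp hd with h | h
          · subst h; exact hc
          · exact hpre d h, hb⟩

-- the central equivalence: B's segment scan equals A's force computation on any
-- suffix cs entered just after an anchor of direction d at position p
theorem main_lemma : ∀ (N : Nat) (cs : List Char), cs.length ≤ N →
    ∀ (n p : Int) (d : Char) (standing : List Int),
    (d = 'L' ∨ d = 'R') → (d = 'R' → 0 ≤ p) → (-1 ≤ p) →
    (p + 1 + cs.length ≤ n) →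
    altGo (p + 1) d p [] standing cs =
      standing ++ collectA (p + 1) cs
        (List.zipWith (· - ·) (fwdGo n (if d = 'R' then n else 0) cs) (bwdGo n cs).1) := by
  intro N
  induction N with
  | zero =>
    intro cs hlen n p d standing hd _ _ _
    have hnil : cs = [] := List.length_eq_zero_iff.mp (Nat.le_zero.mp hlen)
    subst hnil
    rcases hd with hd | hd <;> subst hd <;> simp [altGo, fwdGo, bwdGo, collectA]
  | succ N ih =>
    intro cs hlen n p d standing hd hdR hp hn
    rcases free_or_split cs with hfree | ⟨pre, b, rest, heq, hpre, hb⟩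
    · -- cs contains no pushed domino
      have hfw := altGo_free cs hfree (p + 1) p d [] standing []
      rw [List.append_nil] at hfw
      simp only [List.nil_append, altGo] at hfw
      have hbz : (bwdGo n cs).1 = List.replicate cs.length (0 : Int) := by
        rw [bwdGo_eq_aux, bwd_free_zero n cs hfree]
      rcases hd with hd | hd <;> subst hd
      · have h1 := fwd_free_zero n cs [] hfree
        simp only [fwdGo, List.append_nil] at h1
        rw [if_neg (show ¬('L' : Char) = 'R' by decide), h1, hbz,
          zipWith_sub_repl_right _ cs.length (by simp),
          collect_dots cs (p + 1)]
        simpa using hfw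
      · have hp0 := hdR rfl
        have h1 := fwd_free_pos n cs [] hfree n (by push_cast at hn ⊢; omega)
        simp only [fwdGo, List.append_nil] at h1
        rw [if_pos rfl, h1, hbz, zipWith_sub_repl_right _ cs.length (by simp)]
        rw [collect_nonzero cs (p + 1) _ (by
          intro x hx
          simp only [List.mem_map, List.mem_range] at hx
          obtain ⟨k, hk, rfl⟩ := hx
          have hk' : (k : Int) < cs.length := by exact_mod_cast hk
          push_cast at hn
          omega)]
        rw [List.append_nil]
        simpa using hfw
    · -- cs = pre ++ b :: rest with an anchor-free prefix
      subst heq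
      have hlens : (pre ++ b :: rest).length = pre.length + (rest.length + 1) := by simp
      have hrest : rest.length ≤ N := by rw [hlens] at hlen; omega
      have hnQ : p + 1 + (pre.length : Int) + 1 + (rest.length : Int) ≤ n := by
        rw [hlens] at hn; push_cast at hn; omega
      -- walk B over the free prefix
      have hfw := altGo_free pre hpre (p + 1) p d [] standing (b :: rest)
      simp only [List.nil_append] at hfw
      -- the shared recursive tail
      have ihres : ∀ (d' : Char) (st : List Int), (d' = 'L' ∨ d' = 'R') →
          (d' = 'R' → (0 : Int) ≤ p + 1 + (pre.length : Int)) →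
          altGo (p + 1 + (pre.length : Int) + 1) d' (p + 1 + (pre.length : Int)) [] st rest
            = st ++ collectA (p + 1 + (pre.length : Int) + 1) rest
                (List.zipWith (· - ·) (fwdGo n (if d' = 'R' then n else 0) rest)
                  (bwdGo n rest).1) := by
        intro d' st hd' hd'R
        exact ih rest hrest n (p + 1 + (pre.length : Int)) d' st hd' hd'R (by omega)
          (by omega)
      rcases hd with hd | hd <;> rcases hb with hbv | hbv <;> subst hd <;> subst hbv
      · -- d = 'L', b = 'L'
        have hf1 : fwdGo n 0 (pre ++ 'L' :: rest)
            = List.replicate pre.length 0 ++ 0 :: fwdGo n 0 rest := by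
          rw [fwd_free_zero n pre _ hpre]; simp [fwdGo]
        have hb1 : (bwdGo n (pre ++ 'L' :: rest)).1
            = (List.range pre.length).map
                (fun k : Nat => n - (pre.length : Int) + (k : Int))
              ++ n :: (bwdGo n rest).1 := by
          have hbbL : bwdAux n 0 ('L' :: rest) = (n :: (bwdAux n 0 rest).1, n) := by
            simp [bwdAux]
          rw [bwdGo_eq_aux, bwdAux_append]
          simp only [hbbL, bwd_free_pos n pre hpre n (by push_cast at hnQ ⊢; omega)]
          rw [← bwdGo_eq_aux]
        rw [if_neg (show ¬('L' : Char) = 'R' by decide), hf1, hb1,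
          zipWith_sub_split _ _ _ _ (by simp), List.zipWith_cons_cons,
          collectA_append _ _ _ _ _ (by simp), hfw]
        rw [zipWith_sub_repl_left _ pre.length (by simp)]
        rw [collect_nonzero pre (p + 1) _ (by
          intro x hx
          simp only [List.mem_map, List.mem_range] at hx
          obtain ⟨k, ⟨k2, hk2, rfl⟩, rfl⟩ := hx
          have hk' : (k2 : Int) < pre.length := by exact_mod_cast hk2
          omega)]
        have hstep : altGo (p + 1 + (pre.length : Int)) 'L' p (dotsFrom (p + 1) pre)
              standing ('L' :: rest)
            = altGo (p + 1 + (pre.length : Int) + 1) 'L' (p + 1 + (pre.length : Int))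
                [] standing rest := by
          simp [altGo]
        rw [hstep, ihres 'L' standing (Or.inl rfl) (fun h => absurd h (by decide))]
        simp [collectA]
      · -- d = 'L', b = 'R'
        have hf1 : fwdGo n 0 (pre ++ 'R' :: rest)
            = List.replicate pre.length 0 ++ n :: fwdGo n n rest := by
          rw [fwd_free_zero n pre _ hpre]; simp [fwdGo]
        have hb1 : (bwdGo n (pre ++ 'R' :: rest)).1
            = List.replicate pre.length 0 ++ 0 :: (bwdGo n rest).1 := by
          have hbbR : bwdAux n 0 ('R' :: rest) = (0 :: (bwdAux n 0 rest).1, 0) := by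
            simp [bwdAux]
          rw [bwdGo_eq_aux, bwdAux_append]
          simp only [hbbR, bwd_free_zero n pre hpre]
          rw [← bwdGo_eq_aux]
        rw [if_neg (show ¬('L' : Char) = 'R' by decide), hf1, hb1,
          zipWith_sub_split _ _ _ _ (by simp), List.zipWith_cons_cons,
          collectA_append _ _ _ _ _ (by simp), hfw]
        rw [zipWith_sub_repl_right _ pre.length (by simp),
          collect_dots pre (p + 1)]
        have hstep : altGo (p + 1 + (pre.length : Int)) 'L' p (dotsFrom (p + 1) pre)
              standing ('R' :: rest)
            = altGo (p + 1 + (pre.length : Int) + 1) 'R' (p + 1 + (pre.length : Int))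
                [] (standing ++ dotsFrom (p + 1) pre) rest := by
          simp [altGo]
        rw [hstep, ihres 'R' (standing ++ dotsFrom (p + 1) pre) (Or.inr rfl)
          (fun _ => by omega)]
        simp [collectA]
      · -- d = 'R', b = 'L'
        have hp0 := hdR rfl
        have hf1 : fwdGo n n (pre ++ 'L' :: rest)
            = (List.range pre.length).map (fun k : Nat => n - 1 - (k : Int))
              ++ 0 :: fwdGo n 0 rest := by
          rw [fwd_free_pos n pre _ hpre n (by push_cast at hnQ ⊢; omega)]; simp [fwdGo]
        have hb1 : (bwdGo n (pre ++ 'L' :: rest)).1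
            = (List.range pre.length).map
                (fun k : Nat => n - (pre.length : Int) + (k : Int))
              ++ n :: (bwdGo n rest).1 := by
          have hbbL : bwdAux n 0 ('L' :: rest) = (n :: (bwdAux n 0 rest).1, n) := by
            simp [bwdAux]
          rw [bwdGo_eq_aux, bwdAux_append]
          simp only [hbbL, bwd_free_pos n pre hpre n (by push_cast at hnQ ⊢; omega)]
          rw [← bwdGo_eq_aux]
        rw [if_pos rfl, hf1, hb1,
          zipWith_sub_split _ _ _ _ (by simp), List.zipWith_cons_cons,
          collectA_append _ _ _ _ _ (by simp), hfw]
        have hzip : List.zipWith (· - ·)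
            ((List.range pre.length).map (fun k : Nat => n - 1 - (k : Int)))
            ((List.range pre.length).map
              (fun k : Nat => n - (pre.length : Int) + (k : Int)))
            = (List.range pre.length).map
                (fun k : Nat => ((pre.length : Int) - 1) - 2 * (k : Int)) := by
          rw [zipWith_map_same]
          apply List.map_congr_left
          intro k _; ring
        rw [hzip, collect_lin pre (p + 1) ((pre.length : Int) - 1)]
        have hstep : altGo (p + 1 + (pre.length : Int)) 'R' p (dotsFrom (p + 1) pre)
              standing ('L' :: rest)
            = altGo (p + 1 + (pre.length : Int) + 1) 'L' (p + 1 + (pre.length : Int)) []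
                (if (p + (p + 1 + (pre.length : Int))) % 2 = 0 then
                  (if (p + (p + 1 + (pre.length : Int))) / 2 + 1 ∈ dotsFrom (p + 1) pre then
                    standing ++ [(p + (p + 1 + (pre.length : Int))) / 2 + 1]
                  else standing)
                else standing) rest := by
          simp [altGo, PySem.Int.mod_eq_emod_of_pos (show (0 : Int) < 2 by norm_num),
            PySem.Int.floordiv_eq_ediv_of_pos (show (0 : Int) < 2 by norm_num)]
        rw [hstep, ihres 'L' _ (Or.inl rfl) (fun h => absurd h (by decide))]
        by_cases hpar : ((pre.length : Int) - 1) % 2 = 0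
        · -- odd interior gap: only its exact middle may stand
          have hcond : (p + (p + 1 + (pre.length : Int))) % 2 = 0 := by omega
          have hmid : (p + (p + 1 + (pre.length : Int))) / 2 + 1
              = p + 1 + ((pre.length : Int) - 1) / 2 + 1 := by omega
          have hcast : ((((pre.length : Int) - 1) / 2).toNat : Int)
              = ((pre.length : Int) - 1) / 2 := by omega
          have hmem := mem_dotsFrom pre (p + 1) (((pre.length : Int) - 1) / 2).toNat
            (by omega)
          rw [hcast] at hmem
          rw [if_pos hcond, hmid]
          by_cases hg : pre.getD ((((pre.length : Int) - 1) / 2).toNat) 'L' = '.'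
          · rw [if_pos (show p + 1 + ((pre.length : Int) - 1) / 2 + 1
                  ∈ dotsFrom (p + 1) pre from hmem.mpr hg),
              if_pos (show ((pre.length : Int) - 1) % 2 = 0 ∧
                  0 ≤ (pre.length : Int) - 1 ∧
                  (pre.length : Int) - 1 < 2 * (pre.length : Int) ∧
                  pre.getD ((((pre.length : Int) - 1) / 2).toNat) 'L' = '.' from
                ⟨hpar, by omega, by omega, hg⟩)]
            simp [collectA]
          · rw [if_neg (show ¬(p + 1 + ((pre.length : Int) - 1) / 2 + 1
                  ∈ dotsFrom (p + 1) pre) from fun hm => hg (hmem.mp hm)),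
              if_neg (show ¬(((pre.length : Int) - 1) % 2 = 0 ∧
                  0 ≤ (pre.length : Int) - 1 ∧
                  (pre.length : Int) - 1 < 2 * (pre.length : Int) ∧
                  pre.getD ((((pre.length : Int) - 1) / 2).toNat) 'L' = '.') from by
                rintro ⟨-, -, -, hgg⟩; exact hg hgg)]
            simp [collectA]
        · -- even gap: nothing in it stands
          rw [if_neg (show ¬(p + (p + 1 + (pre.length : Int))) % 2 = 0 from
              fun h => hpar (by omega)),
            if_neg (show ¬(((pre.length : Int) - 1) % 2 = 0 ∧
                0 ≤ (pre.length : Int) - 1 ∧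
                (pre.length : Int) - 1 < 2 * (pre.length : Int) ∧
                pre.getD ((((pre.length : Int) - 1) / 2).toNat) 'L' = '.') from by
              rintro ⟨h, -⟩; exact hpar h)]
          simp [collectA]
      · -- d = 'R', b = 'R'
        have hp0 := hdR rfl
        have hf1 : fwdGo n n (pre ++ 'R' :: rest)
            = (List.range pre.length).map (fun k : Nat => n - 1 - (k : Int))
              ++ n :: fwdGo n n rest := by
          rw [fwd_free_pos n pre _ hpre n (by push_cast at hnQ ⊢; omega)]; simp [fwdGo]
        have hb1 : (bwdGo n (pre ++ 'R' :: rest)).1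
            = List.replicate pre.length 0 ++ 0 :: (bwdGo n rest).1 := by
          have hbbR : bwdAux n 0 ('R' :: rest) = (0 :: (bwdAux n 0 rest).1, 0) := by
            simp [bwdAux]
          rw [bwdGo_eq_aux, bwdAux_append]
          simp only [hbbR, bwd_free_zero n pre hpre]
          rw [← bwdGo_eq_aux]
        rw [if_pos rfl, hf1, hb1,
          zipWith_sub_split _ _ _ _ (by simp), List.zipWith_cons_cons,
          collectA_append _ _ _ _ _ (by simp), hfw]
        rw [zipWith_sub_repl_right _ pre.length (by simp)]
        rw [collect_nonzero pre (p + 1) _ (by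
          intro x hx
          simp only [List.mem_map, List.mem_range] at hx
          obtain ⟨k, hk, rfl⟩ := hx
          have hk' : (k : Int) < pre.length := by exact_mod_cast hk
          omega)]
        have hstep : altGo (p + 1 + (pre.length : Int)) 'R' p (dotsFrom (p + 1) pre)
              standing ('R' :: rest)
            = altGo (p + 1 + (pre.length : Int) + 1) 'R' (p + 1 + (pre.length : Int))
                [] standing rest := by
          simp [altGo]
        rw [hstep, ihres 'R' standing (Or.inr rfl) (fun _ => by omega)]
        simp [collectA]

theorem fmt_eq (l : List Int) : fmtA l = fmtB l := rfl

-- ===== VERDICT (by name: the statement is the Claim_ definition above) =====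
theorem top_lemma (cs : List Char) :
    collectA 0 cs (List.zipWith (· - ·) (fwdGo (cs.length : Int) 0 cs)
      (bwdGo (cs.length : Int) cs).1) = altGo 0 'L' (-1) [] [] cs := by
  have h := main_lemma cs.length cs le_rfl (cs.length : Int)
    (-1) 'L' [] (Or.inl rfl) (by intro h; exact absurd h (by decide)) (by omega)
    (by omega)
  rw [if_neg (show ¬('L' : Char) = 'R' by decide)] at h
  norm_num at h
  exact h.symm

theorem solution_spec : Claim_equal_solution := by
  intro num data _
  show solution num data = solution_alt num data
  have hA : solution num data = fmtA (collectA 0 data.toList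
      (List.zipWith (· - ·) (fwdGo (data.toList.length : Int) 0 data.toList)
        (bwdGo (data.toList.length : Int) data.toList).1)) := rfl
  have hB : solution_alt num data = fmtB (altGo 0 'L' (-1) [] [] data.toList) := rfl
  rw [hA, hB, top_lemma, fmt_eq]
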